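-- pv_equiv track=rewrite | github.com/PavelShpagin/AQUA | test/run_errant_m2.py | custom_tokenize_spaces
-- ===== SOURCE A (Python) =====
-- def custom_tokenize_spaces(text):
--     """
--     Tokenize text treating each space as a single token.
--     This prevents spaCy from grouping multiple spaces into one token.
--     """
--     tokens = []
--     current_word = ''
--
--     for char in text:
--         if char == ' ':
--             if current_word:
--                 tokens.append(current_word)
--                 current_word = ''
--             tokens.append(' ')
--         else:
--             current_word += char
--
--     if current_word:
--         tokens.append(current_word)
--
--     return tokens
-- ===== SOURCE B (Python) =====
-- def custom_tokenize_spaces(text):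
--     """
--     Tokenize text treating each space as a single token.
--     Split-then-interleave: split on single spaces (keeping empty parts),
--     emit each non-empty part and one ' ' token between adjacent parts.
--     """
--     parts = text.split(' ')
--     tokens = []
--     last = len(parts) - 1
--     for i, p in enumerate(parts):
--         if p:
--             tokens.append(p)
--         if i < last:
--             tokens.append(' ')
--     return tokens
-- ===== Notes on version B (the rewrite author's own statement) =====
-- stated objective: simpler
-- what changed: Replaces the char-by-char accumulator loop with a single split on the space separator followed by one interleaving pass that emits each non-empty part and one space token between adjacent parts.
import Mathlib
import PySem

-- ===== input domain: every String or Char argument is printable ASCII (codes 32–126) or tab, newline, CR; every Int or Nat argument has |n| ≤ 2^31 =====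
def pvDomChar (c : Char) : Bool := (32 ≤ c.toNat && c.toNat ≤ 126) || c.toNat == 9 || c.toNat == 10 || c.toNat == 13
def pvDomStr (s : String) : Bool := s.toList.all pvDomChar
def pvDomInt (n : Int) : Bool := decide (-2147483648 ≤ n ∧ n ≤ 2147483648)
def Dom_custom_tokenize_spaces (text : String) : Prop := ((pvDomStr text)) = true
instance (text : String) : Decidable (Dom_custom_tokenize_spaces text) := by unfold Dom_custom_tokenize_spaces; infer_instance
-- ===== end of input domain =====

-- B replaces A's char-by-char accumulator loop with split(' ') plus one interleaving pass (objective: simpler).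

-- ===== PORT A =====
-- the body of A's for-loop: state = (tokens, current_word); current_word kept as List Char (Python += on str)
def pvStepA (st : List String × List Char) (c : Char) : List String × List Char :=
  if c = ' ' then
    ((if st.2 = [] then st.1 else st.1 ++ [String.ofList st.2]) ++ [" "], [])
  else (st.1, st.2 ++ [c])

-- A's trailing 'if current_word: tokens.append(current_word)'
def pvFinishA (st : List String × List Char) : List String :=
  if st.2 = [] then st.1 else st.1 ++ [String.ofList st.2]

def custom_tokenize_spaces (text : String) : List String :=
  pvFinishA (text.toList.foldl pvStepA ([], []))

-- ===== PORT B =====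
-- the loop of Source B: append p if non-empty, append ' ' after every part except the last
def pvInterleave : List (List Char) → List String
  | [] => []
  | [p] => if p = [] then [] else [String.ofList p]
  | p :: q :: t => (if p = [] then [" "] else [String.ofList p, " "]) ++ pvInterleave (q :: t)

def custom_tokenize_spaces_alt (text : String) : List String :=
  pvInterleave (PySem.Chars.splitOn text.toList [' '])   -- text.split(' ')

-- ===== PRECONDITION & SPEC =====
def Spec_custom_tokenize_spaces (text : String) (out : List String) : Prop := out = custom_tokenize_spaces_alt text
instance (text : String) (out : List String) : Decidable (Spec_custom_tokenize_spaces text out) := by unfold Spec_custom_tokenize_spaces; infer_instance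

-- ===== CLAIM (what is proved, stated in full; the proofs are below) =====
def Claim_equal_custom_tokenize_spaces : Prop := ∀ (text : String), Dom_custom_tokenize_spaces text → Spec_custom_tokenize_spaces text (custom_tokenize_spaces text)

-- ===== LEMMAS AND PROOFS =====

-- simple recursive characterisation of splitting on a single space
def pvConsHead (pre : List Char) : List (List Char) → List (List Char)
  | [] => [pre]
  | h :: t => (pre ++ h) :: t

def pvSp : List Char → List (List Char)
  | [] => [[]]
  | c :: cs => if c = ' ' then [] :: pvSp cs else pvConsHead [c] (pvSp cs)

theorem pvSp_ne_nil (cs : List Char) : pvSp cs ≠ [] := by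
  cases cs with
  | nil => simp [pvSp]
  | cons c cs =>
    simp only [pvSp]
    split
    · simp
    · cases h : pvSp cs <;> simp [pvConsHead]

theorem pvSplitOn_go_eq (l : List Char) : ∀ (fuel : Nat) (cur : List Char) (acc : List (List Char)),
    l.length < fuel →
    PySem.Chars.splitOn.go [' '] fuel l cur acc = acc.reverse ++ pvConsHead cur.reverse (pvSp l) := by
  induction l with
  | nil =>
    intro fuel cur acc hf
    cases fuel with
    | zero => omega
    | succ fuel => simp [PySem.Chars.splitOn.go, pvSp, pvConsHead]
  | cons c rest ih =>
    intro fuel cur acc hf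
    cases fuel with
    | zero => omega
    | succ fuel =>
      by_cases hc : c = ' '
      · subst hc
        have hpre : List.isPrefixOf [' '] (' ' :: rest) = true := by
          simp [List.isPrefixOf]
        have hgo : PySem.Chars.splitOn.go [' '] (fuel+1) (' ' :: rest) cur acc
            = PySem.Chars.splitOn.go [' '] fuel rest [] (cur.reverse :: acc) := by
          simp [PySem.Chars.splitOn.go, hpre]
        rw [hgo, ih fuel [] (cur.reverse :: acc) (by simpa using Nat.lt_of_succ_lt_succ hf)]
        simp only [pvSp]
        cases h : pvSp rest with
        | nil => exact absurd h (pvSp_ne_nil rest)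
        | cons h' t => simp [pvConsHead]
      · have hpre : List.isPrefixOf [' '] (c :: rest) = false := by
          simp [List.isPrefixOf]
          exact fun h => hc h.symm
        have hgo : PySem.Chars.splitOn.go [' '] (fuel+1) (c :: rest) cur acc
            = PySem.Chars.splitOn.go [' '] fuel rest (c :: cur) acc := by
          simp [PySem.Chars.splitOn.go, hpre]
        rw [hgo, ih fuel (c :: cur) acc (by simpa using Nat.lt_of_succ_lt_succ hf)]
        simp only [pvSp, if_neg hc]
        cases h : pvSp rest with
        | nil => exact absurd h (pvSp_ne_nil rest)
        | cons h' t => simp [pvConsHead]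

theorem pvSplitOn_space (cs : List Char) : PySem.Chars.splitOn cs [' '] = pvSp cs := by
  unfold PySem.Chars.splitOn
  rw [pvSplitOn_go_eq cs (cs.length + 1) [] [] (by omega)]
  cases h : pvSp cs with
  | nil => exact absurd h (pvSp_ne_nil cs)
  | cons a t => simp [pvConsHead]

theorem pvInterleave_consHead (cur : List Char) (p : List Char) (xs : List (List Char)) :
    pvConsHead cur (pvConsHead p xs) = pvConsHead (cur ++ p) xs := by
  cases xs <;> simp [pvConsHead]

-- loop invariant: finishing A's fold equals toks ++ interleave of the split of the rest
theorem pvFold_eq (cs : List Char) : ∀ (toks : List String) (cur : List Char),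
    pvFinishA (cs.foldl pvStepA (toks, cur)) = toks ++ pvInterleave (pvConsHead cur (pvSp cs)) := by
  induction cs with
  | nil =>
    intro toks cur
    simp only [List.foldl_nil, pvSp, pvConsHead, List.append_nil, pvFinishA]
    by_cases h : cur = [] <;> simp [h, pvInterleave]
  | cons c rest ih =>
    intro toks cur
    rw [List.foldl_cons]
    by_cases hc : c = ' '
    · subst hc
      have hstep : pvStepA (toks, cur) ' '
          = ((if cur = [] then toks else toks ++ [String.ofList cur]) ++ [" "], []) := by
        simp [pvStepA]
      rw [hstep, ih ((if cur = [] then toks else toks ++ [String.ofList cur]) ++ [" "]) []]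
      rw [show pvSp (' ' :: rest) = [] :: pvSp rest from by simp [pvSp]]
      cases h : pvSp rest with
      | nil => exact absurd h (pvSp_ne_nil rest)
      | cons h' t =>
        simp only [pvConsHead, List.nil_append, List.append_nil]
        rw [show pvInterleave (cur :: h' :: t)
              = (if cur = [] then [" "] else [String.ofList cur, " "]) ++ pvInterleave (h' :: t)
            from rfl]
        by_cases hcur : cur = [] <;> simp [hcur]
    · have hstep : pvStepA (toks, cur) c = (toks, cur ++ [c]) := by
        simp [pvStepA, hc]
      rw [hstep, ih toks (cur ++ [c])]
      simp only [pvSp, if_neg hc, pvInterleave_consHead]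

-- ===== VERDICT (by name: the statement is the Claim_ definition above) =====
theorem custom_tokenize_spaces_spec : Claim_equal_custom_tokenize_spaces := by
  intro text _
  show custom_tokenize_spaces text = custom_tokenize_spaces_alt text
  unfold custom_tokenize_spaces custom_tokenize_spaces_alt
  rw [pvSplitOn_space, pvFold_eq text.toList [] []]
  cases h : pvSp text.toList with
  | nil => exact absurd h (pvSp_ne_nil text.toList)
  | cons a t => simp [pvConsHead]
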